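-- pv_equiv track=rewrite | github.com/mammaspappa/whowaswherewhen | ingest/gutenberg.py | deduplicate_locations
-- ===== SOURCE A (Python) =====
-- def deduplicate_locations(locations):
--     """Merge duplicate locations by place name, keeping the one with most detail."""
--     seen = {}
--     for loc in locations:
--         key = loc.get('place_name', '').lower().strip()
--         if not key:
--             continue
--         if key not in seen or len(loc.get('description', '')) > len(seen[key].get('description', '')):
--             seen[key] = loc
--     return list(seen.values())
-- ===== SOURCE B (Python) =====
-- def deduplicate_locations(locations):
--     """Merge duplicate locations by place name, keeping the one with most detail."""
--     keyed = [(loc.get('place_name', '').lower().strip(), loc) for loc in locations]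
--     result = []
--     done = set()
--     for key, loc in keyed:
--         if not key or key in done:
--             continue
--         done.add(key)
--         best = loc
--         for k2, cand in keyed:
--             if k2 == key and len(cand.get('description', '')) > len(best.get('description', '')):
--                 best = cand
--         result.append(best)
--     return result
-- ===== Notes on version B (the rewrite author's own statement) =====
-- stated objective: alternative
-- what changed: A keeps a running best-per-key dict updated in one pass and returns its values; B uses no dict at all: it pre-keys the list, walks it, and at each first occurrence of a non-empty key rescans the whole keyed list for the longest-description entry (strict comparison keeps the earliest winner), appending winners in first-appearance order.
import Mathlib
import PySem

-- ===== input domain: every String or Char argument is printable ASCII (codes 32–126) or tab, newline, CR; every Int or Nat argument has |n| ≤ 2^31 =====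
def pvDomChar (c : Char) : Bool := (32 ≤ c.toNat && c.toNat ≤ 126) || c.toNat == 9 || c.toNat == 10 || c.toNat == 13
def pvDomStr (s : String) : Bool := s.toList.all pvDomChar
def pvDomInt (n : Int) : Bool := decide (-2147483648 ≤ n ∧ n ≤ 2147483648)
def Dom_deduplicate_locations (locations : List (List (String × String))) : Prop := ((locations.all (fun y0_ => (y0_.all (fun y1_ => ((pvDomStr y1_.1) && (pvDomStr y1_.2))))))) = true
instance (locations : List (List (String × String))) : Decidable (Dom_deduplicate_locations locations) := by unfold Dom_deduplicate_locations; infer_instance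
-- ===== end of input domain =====

-- B replaces A's keep-the-best-so-far dict with a dict-free nested scan: it walks the
-- pre-keyed list, and at each first occurrence of a non-empty key rescans the whole list
-- for that key's longest-description entry (an alternative, dict-free decomposition of the same task).

-- ===== PORT A =====
-- A's loop body: key lookup, skip empty key, keep the location with the strictly longer description.
def dedupStepA (seen : PySem.Dict String (List (String × String))) (loc : List (String × String)) :
    PySem.Dict String (List (String × String)) :=
  let key := PySem.Str.strip (PySem.Str.lower ((PySem.Dict.mk loc).getD "place_name" ""))
  if key = "" then seen
  else if seen.contains key = false ∨
      PySem.Str.len ((PySem.Dict.mk loc).getD "description" "") >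
        PySem.Str.len ((PySem.Dict.mk (seen.getD key [])).getD "description" "") then
    seen.insert key loc
  else seen

def deduplicate_locations (locations : List (List (String × String))) : List (List (String × String)) :=
  (locations.foldl dedupStepA PySem.Dict.empty).values

-- ===== PORT B =====
-- inner scan: best = loc; for k2, cand in keyed: if k2 == key and len(cand...) > len(best...): best = cand
def pvScanBest (key : String) (keyed : List (String × List (String × String)))
    (best : List (String × String)) : List (String × String) :=
  keyed.foldl (fun best p =>
    if p.1 = key ∧ PySem.Str.len ((PySem.Dict.mk p.2).getD "description" "") >
        PySem.Str.len ((PySem.Dict.mk best).getD "description" "") then p.2 else best) best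

-- outer loop: skip empty or already-done keys; at a fresh key, mark it done and append the scan's winner
def pvEmit (keyed : List (String × List (String × String))) :
    List (String × List (String × String)) → PySem.Set String →
      List (List (String × String)) → List (List (String × String))
  | [], _, result => result
  | (key, loc) :: rest, done, result =>
    if key = "" ∨ PySem.Set.contains done key = true then pvEmit keyed rest done result
    else pvEmit keyed rest (PySem.Set.add done key) (result ++ [pvScanBest key keyed loc])

def deduplicate_locations_alt (locations : List (List (String × String))) : List (List (String × String)) :=
  let keyed := locations.map (fun loc =>
    (PySem.Str.strip (PySem.Str.lower ((PySem.Dict.mk loc).getD "place_name" "")), loc))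
  pvEmit keyed keyed PySem.Set.empty []

-- ===== PRECONDITION & SPEC =====
def Spec_deduplicate_locations (locations : List (List (String × String))) (out : List (List (String × String))) : Prop := out = deduplicate_locations_alt locations
instance (locations : List (List (String × String))) (out : List (List (String × String))) : Decidable (Spec_deduplicate_locations locations out) := by unfold Spec_deduplicate_locations; infer_instance

-- ===== CLAIM (what is proved, stated in full; the proofs are below) =====
def Claim_equal_deduplicate_locations : Prop := ∀ (locations : List (List (String × String))), Dom_deduplicate_locations locations → Spec_deduplicate_locations locations (deduplicate_locations locations)

-- ===== LEMMAS AND PROOFS =====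

def pvKeyOf (loc : List (String × String)) : String :=
  PySem.Str.strip (PySem.Str.lower ((PySem.Dict.mk loc).getD "place_name" ""))

def pvLen (loc : List (String × String)) : Int :=
  PySem.Str.len ((PySem.Dict.mk loc).getD "description" "")

def pvUpd (b l : List (String × String)) : List (String × String) :=
  if pvLen l > pvLen b then l else b

def pvFilt (k : String) (L : List (List (String × String))) : List (List (String × String)) :=
  L.filter (fun l => pvKeyOf l = k)

-- extend an optional best by a (filtered) list of candidates
def pvExtF (o : Option (List (String × String))) (fl : List (List (String × String))) :
    Option (List (String × String)) :=
  fl.foldl (fun o l => some (match o with | none => l | some b => pvUpd b l)) o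

-- the winner of key k over the whole list
def pvBest (k : String) (L : List (List (String × String))) : Option (List (String × String)) :=
  pvExtF none (pvFilt k L)

-- first-appearance order of the new non-empty keys of S relative to already-seen keys ks
def pvFK : List (List (String × String)) → List String → List String
  | [], _ => []
  | l :: S, ks =>
    if pvKeyOf l = "" ∨ pvKeyOf l ∈ ks then pvFK S ks
    else pvKeyOf l :: pvFK S (ks ++ [pvKeyOf l])

-- dedupStepA rewritten through the proof abbreviations (definitional)
lemma dedupStepA_eq (seen : PySem.Dict String (List (String × String)))
    (l : List (String × String)) :
    dedupStepA seen l =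
      if pvKeyOf l = "" then seen
      else if seen.contains (pvKeyOf l) = false ∨
          pvLen l > pvLen (seen.getD (pvKeyOf l) []) then
        seen.insert (pvKeyOf l) l
      else seen := rfl

lemma pvUpd_self (l : List (String × String)) : pvUpd l l = l := by simp [pvUpd]

lemma pvExtF_some (fl : List (List (String × String))) :
    ∀ b, pvExtF (some b) fl = some (fl.foldl pvUpd b) := by
  induction fl with
  | nil => intro b; rfl
  | cons l fl ih => intro b; simpa [pvExtF, List.foldl_cons] using ih (pvUpd b l)

lemma pvExtF_none_cons (l : List (String × String)) (fl : List (List (String × String))) :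
    pvExtF none (l :: fl) = some (fl.foldl pvUpd l) := by
  simpa [pvExtF, List.foldl_cons] using pvExtF_some fl l

lemma pvFilt_cons (k : String) (l : List (String × String)) (L : List (List (String × String))) :
    pvFilt k (l :: L) = if pvKeyOf l = k then l :: pvFilt k L else pvFilt k L := by
  by_cases h : pvKeyOf l = k <;> simp [pvFilt, List.filter_cons, h]

lemma pvFK_mem {k : String} : ∀ {S ks}, k ∈ pvFK S ks → k ≠ "" ∧ k ∉ ks ∧ ∃ l ∈ S, pvKeyOf l = k := by
  intro S
  induction S with
  | nil => intro ks h; simp [pvFK] at h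
  | cons l S ih =>
    intro ks h
    by_cases hc : pvKeyOf l = "" ∨ pvKeyOf l ∈ ks
    · rw [pvFK, if_pos hc] at h
      obtain ⟨h1, h2, l', hl', hk⟩ := ih h
      exact ⟨h1, h2, l', List.mem_cons_of_mem _ hl', hk⟩
    · rw [pvFK, if_neg hc] at h
      push_neg at hc
      rcases List.mem_cons.mp h with h | h
      · exact ⟨h ▸ hc.1, h ▸ hc.2, l, List.mem_cons_self, h.symm⟩
      · obtain ⟨h1, h2, l', hl', hk⟩ := ih h
        have : k ∉ ks := fun hm => h2 (List.mem_append_left _ hm)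
        exact ⟨h1, this, l', List.mem_cons_of_mem _ hl', hk⟩

lemma pvFK_nodup : ∀ (S : List (List (String × String))) (ks : List String),
    ks.Nodup → (ks ++ pvFK S ks).Nodup := by
  intro S
  induction S with
  | nil => intro ks h; simpa [pvFK] using h
  | cons l S ih =>
    intro ks h
    by_cases hc : pvKeyOf l = "" ∨ pvKeyOf l ∈ ks
    · rw [pvFK, if_pos hc]; exact ih ks h
    · rw [pvFK, if_neg hc]
      push_neg at hc
      have h' : (ks ++ [pvKeyOf l]).Nodup := by
        refine h.append (List.nodup_singleton _) ?_
        intro a ha hb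
        exact hc.2 ((List.mem_singleton.mp hb) ▸ ha)
      have := ih (ks ++ [pvKeyOf l]) h'
      simpa [List.append_assoc] using this

-- step facts for A's loop body
lemma stepA_get?_self (seen : PySem.Dict String (List (String × String)))
    (l : List (String × String)) (h : pvKeyOf l ≠ "") :
    (dedupStepA seen l).get? (pvKeyOf l) =
      some (match seen.get? (pvKeyOf l) with | none => l | some b => pvUpd b l) := by
  cases hg : seen.get? (pvKeyOf l) with
  | none =>
    have hc : seen.contains (pvKeyOf l) = false :=
      (PySem.Dict.get?_eq_none_iff_contains seen (pvKeyOf l)).mp hg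
    simp only [dedupStepA_eq]
    rw [if_neg h, if_pos (Or.inl hc), PySem.Dict.get?_insert_self]
  | some b =>
    have hc : seen.contains (pvKeyOf l) = true := by
      rw [PySem.Dict.contains_eq_isSome_get?, hg]; rfl
    have hgd : seen.getD (pvKeyOf l) [] = b := by
      rw [PySem.Dict.getD_eq_get?_getD, hg]; rfl
    simp only [dedupStepA_eq]
    rw [if_neg h, hgd]
    by_cases hlt : pvLen l > pvLen b
    · rw [if_pos (Or.inr hlt), PySem.Dict.get?_insert_self]
      simp [pvUpd, hlt]
    · have hno : ¬ (seen.contains (pvKeyOf l) = false ∨ pvLen l > pvLen b) := by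
        rw [hc]; simp [hlt]
      rw [if_neg hno, hg]
      simp [pvUpd, hlt]

lemma stepA_get?_ne (seen : PySem.Dict String (List (String × String)))
    (l : List (String × String)) (k : String) (h : k ≠ pvKeyOf l) :
    (dedupStepA seen l).get? k = seen.get? k := by
  simp only [dedupStepA_eq]
  split_ifs with h1 h2
  · rfl
  · exact PySem.Dict.get?_insert_of_ne seen _ h
  · rfl

lemma stepA_keys (seen : PySem.Dict String (List (String × String)))
    (l : List (String × String)) (h : pvKeyOf l ≠ "") :
    (dedupStepA seen l).keys =
      if seen.contains (pvKeyOf l) then seen.keys else seen.keys ++ [pvKeyOf l] := by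
  cases hc : seen.contains (pvKeyOf l) with
  | false =>
    simp only [dedupStepA_eq]
    rw [if_neg h, if_pos (Or.inl hc)]
    simp [PySem.Dict.keys_insert_of_not_contains seen _ hc]
  | true =>
    simp only [dedupStepA_eq]
    rw [if_neg h]
    split_ifs with h1
    · simp [PySem.Dict.keys_insert_of_contains seen _ hc]
    · simp

lemma stepA_keys_empty (seen : PySem.Dict String (List (String × String)))
    (l : List (String × String)) (h : pvKeyOf l = "") : dedupStepA seen l = seen := by
  simp only [dedupStepA_eq]
  rw [if_pos h]

-- A's fold characterised: keys in first-appearance order, values the per-key running best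
set_option maxHeartbeats 1000000 in
lemma A_fold : ∀ (S : List (List (String × String))) (seen : PySem.Dict String (List (String × String))),
    (S.foldl dedupStepA seen).keys = seen.keys ++ pvFK S seen.keys ∧
    ∀ k, k ≠ "" → (S.foldl dedupStepA seen).get? k = pvExtF (seen.get? k) (pvFilt k S) := by
  intro S
  induction S with
  | nil => intro seen; exact ⟨by simp [pvFK], fun k _ => by simp [pvFilt, pvExtF]⟩
  | cons l S ih =>
    intro seen
    rw [List.foldl_cons]
    by_cases h0 : pvKeyOf l = ""
    · rw [stepA_keys_empty seen l h0]
      obtain ⟨hk, hg⟩ := ih seen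
      refine ⟨by rw [hk, pvFK, if_pos (Or.inl h0)], ?_⟩
      intro k hk0
      rw [hg k hk0, pvFilt_cons, if_neg (fun he => hk0 (he.symm.trans h0))]
    · obtain ⟨hk, hg⟩ := ih (dedupStepA seen l)
      constructor
      · rw [hk, stepA_keys seen l h0]
        rw [PySem.Dict.contains_eq_decide_mem_keys]
        by_cases hm : pvKeyOf l ∈ seen.keys
        · rw [if_pos (by simpa using hm), pvFK, if_pos (Or.inr hm)]
        · rw [if_neg (by simpa using hm), pvFK, if_neg (by push_neg; exact ⟨h0, hm⟩),
            List.append_assoc, List.singleton_append]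
      · intro k hk0
        rw [hg k hk0, pvFilt_cons]
        by_cases he : pvKeyOf l = k
        · subst he
          rw [if_pos rfl, stepA_get?_self seen l h0]
          cases hx : seen.get? (pvKeyOf l) with
          | none => simp [pvExtF, List.foldl_cons]
          | some b => simp [pvExtF, List.foldl_cons]
        · rw [if_neg he, stepA_get?_ne seen l k (fun h' => he h'.symm)]

-- the inner scan over the keyed list is the plain fold over the key's filtered sublist
lemma scanBest_cons (k key : String) (loc : List (String × String))
    (keyed : List (String × List (String × String))) (b : List (String × String)) :
    pvScanBest k ((key, loc) :: keyed) b =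
      pvScanBest k keyed (if key = k ∧ pvLen loc > pvLen b then loc else b) := rfl

lemma scanBest_eq_filter (k : String) (L : List (List (String × String)))
    (b : List (String × String)) :
    pvScanBest k (L.map (fun l => (pvKeyOf l, l))) b = (pvFilt k L).foldl pvUpd b := by
  induction L generalizing b with
  | nil => rfl
  | cons l L ih =>
    rw [List.map_cons, scanBest_cons, pvFilt_cons]
    by_cases he : pvKeyOf l = k
    · rw [if_pos he, List.foldl_cons]
      have hstep : (if pvKeyOf l = k ∧ pvLen l > pvLen b then l else b) = pvUpd b l := by
        rw [pvUpd]
        by_cases hlt : pvLen l > pvLen b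
        · rw [if_pos ⟨he, hlt⟩, if_pos hlt]
        · rw [if_neg (fun hc => hlt hc.2), if_neg hlt]
      rw [hstep]
      exact ih (pvUpd b l)
    · rw [if_neg he, if_neg (fun hc => he hc.1)]
      exact ih b

-- B's outer loop characterised against pvFK / pvBest
lemma B_emit (L : List (List (String × String))) :
    ∀ (S' P : List (List (String × String))) (ks : List String)
      (res : List (List (String × String))),
    P ++ S' = L →
    (∀ k, k ∈ ks ↔ (k ≠ "" ∧ ∃ l ∈ P, pvKeyOf l = k)) →
    pvEmit (L.map (fun l => (pvKeyOf l, l))) (S'.map (fun l => (pvKeyOf l, l))) ks res =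
      res ++ (pvFK S' ks).map (fun k => (pvBest k L).getD []) := by
  intro S'
  induction S' with
  | nil => intro P ks res _ _; simp [pvEmit, pvFK]
  | cons l S'' ih =>
    intro P ks res hPS hks
    have hcontains : PySem.Set.contains ks (pvKeyOf l) = true ↔ pvKeyOf l ∈ ks :=
      PySem.Set.contains_iff ks (pvKeyOf l)
    rw [List.map_cons]
    by_cases hc : pvKeyOf l = "" ∨ pvKeyOf l ∈ ks
    · have hc' : pvKeyOf l = "" ∨ PySem.Set.contains ks (pvKeyOf l) = true := by
        rcases hc with h | h
        · exact Or.inl h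
        · exact Or.inr (hcontains.mpr h)
      rw [pvEmit, if_pos hc', pvFK, if_pos hc]
      apply ih (P ++ [l]) ks res (by simpa [List.append_assoc] using hPS)
      intro k
      rw [hks k]
      constructor
      · rintro ⟨h1, l', hl', h2⟩
        exact ⟨h1, l', List.mem_append_left _ hl', h2⟩
      · rintro ⟨h1, l', hl', h2⟩
        rcases List.mem_append.mp hl' with h | h
        · exact ⟨h1, l', h, h2⟩
        · rw [List.mem_singleton.mp h] at h2
          subst h2
          rcases hc with h' | h'
          · exact absurd h' h1
          · -- pvKeyOf l ∈ ks, so it was already in P by hks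
            obtain ⟨hh1, lw, hlw, hh2⟩ := (hks (pvKeyOf l)).mp h'
            exact ⟨h1, lw, hlw, hh2⟩
    · push_neg at hc
      have hc' : ¬ (pvKeyOf l = "" ∨ PySem.Set.contains ks (pvKeyOf l) = true) := by
        rintro (h | h)
        · exact hc.1 h
        · exact hc.2 (hcontains.mp h)
      rw [pvEmit, if_neg hc', pvFK, if_neg (by push_neg; exact hc)]
      have hadd : PySem.Set.add ks (pvKeyOf l) = ks ++ [pvKeyOf l] := by
        simp only [PySem.Set.add]
        rw [if_neg (by rw [hcontains]; exact hc.2)]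
      -- the value emitted at this first occurrence is the whole-list winner for this key
      have hPfilt : pvFilt (pvKeyOf l) P = [] := by
        rw [pvFilt, List.filter_eq_nil_iff]
        intro l' hl' h'
        exact hc.2 ((hks (pvKeyOf l)).mpr ⟨hc.1, l', hl', by simpa using h'⟩)
      have hval : pvScanBest (pvKeyOf l) (L.map (fun l => (pvKeyOf l, l))) l =
          (pvBest (pvKeyOf l) L).getD [] := by
        rw [scanBest_eq_filter]
        have : pvFilt (pvKeyOf l) L = l :: pvFilt (pvKeyOf l) S'' := by
          rw [← hPS]
          rw [pvFilt, List.filter_append, ← pvFilt, ← pvFilt, hPfilt, List.nil_append,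
            pvFilt_cons, if_pos rfl]
        rw [pvBest, this, pvExtF_none_cons, List.foldl_cons, pvUpd_self]
        rfl
      rw [hadd, hval,
        ih (P ++ [l]) (ks ++ [pvKeyOf l]) (res ++ [(pvBest (pvKeyOf l) L).getD []])
          (by simpa [List.append_assoc] using hPS) ?_]
      · simp [List.append_assoc]
      · intro k
        constructor
        · intro hm
          rcases List.mem_append.mp hm with h | h
          · obtain ⟨h1, l', hl', h2⟩ := (hks k).mp h
            exact ⟨h1, l', List.mem_append_left _ hl', h2⟩
          · rw [List.mem_singleton.mp h]
            exact ⟨hc.1, l, List.mem_append_right _ (List.mem_singleton_self l), rfl⟩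
        · rintro ⟨h1, l', hl', h2⟩
          rcases List.mem_append.mp hl' with h | h
          · exact List.mem_append_left _ ((hks k).mpr ⟨h1, l', h, h2⟩)
          · rw [List.mem_singleton.mp h] at h2
            exact List.mem_append_right _ (List.mem_singleton.mpr h2.symm)

-- ===== VERDICT (by name: the statement is the Claim_ definition above) =====
set_option maxHeartbeats 1000000 in
theorem deduplicate_locations_spec : Claim_equal_deduplicate_locations := by
  intro L _
  show deduplicate_locations L = deduplicate_locations_alt L
  obtain ⟨hkeys, hget⟩ := A_fold L PySem.Dict.empty
  rw [PySem.Dict.keys_empty, List.nil_append] at hkeys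
  have hnd : (L.foldl dedupStepA PySem.Dict.empty).keys.Nodup := by
    rw [hkeys]
    simpa using pvFK_nodup L [] List.nodup_nil
  have hB : deduplicate_locations_alt L = (pvFK L []).map (fun k => (pvBest k L).getD []) := by
    show pvEmit (L.map (fun l => (pvKeyOf l, l))) (L.map (fun l => (pvKeyOf l, l)))
        ([] : PySem.Set String) [] = _
    rw [B_emit L L [] [] [] rfl (by simp)]
    rw [List.nil_append]
  rw [hB]
  show (L.foldl dedupStepA PySem.Dict.empty).values = _
  rw [PySem.Dict.values_eq_map_keys _ hnd [], hkeys]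
  apply List.map_congr_left
  intro k hk
  have hk0 : k ≠ "" := (pvFK_mem hk).1
  rw [PySem.Dict.getD_eq_get?_getD, hget k hk0, PySem.Dict.get?_empty, ← pvBest]
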